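-- pv_equiv track=rewrite | github.com/MinKyeom/KMK-DREAM | Programmers/Lv0/배열 만들기4.py | solution
-- ===== SOURCE A (Python) =====
-- def solution(arr):
--     stk = []
--     i=0
--     while i<len(arr):
--         if len(stk)==0:
--             stk.append(arr[i])
--             i+=1
--         else:
--             if stk[-1]<arr[i]:
--                 stk.append(arr[i])
--                 i+=1
--             else:
--                 stk.pop()
--     return stk
--
-- # 다른 사람 풀이
--     def solution(arr):
--         stk = []
--         for i in range(len(arr)):
--             while stk and stk[-1] >= arr[i]:
--                 stk.pop()
--             stk.append(arr[i])
--         return stk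
-- ===== SOURCE B (Python) =====
-- def solution(arr):
--     # An element survives A's stack process iff every later element is
--     # strictly larger, i.e. the result is the list of strict suffix minima.
--     # Compute it stack-free with one right-to-left running-minimum scan.
--     res = []
--     m = None
--     for x in reversed(arr):
--         if m is None or x < m:
--             res.append(x)
--             m = x
--     return res[::-1]
-- ===== Notes on version B (the rewrite author's own statement) =====
-- stated objective: faster
-- what changed: Replaces A's stack state machine (push/pop with an index that only advances on push) by a stack-free right-to-left running-minimum scan: A's result is exactly the strict suffix minima, so B keeps an element of reversed(arr) iff it is below the minimum seen so far and reverses the collected list; no list pops or re-reads of arr[i].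
import Mathlib
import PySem

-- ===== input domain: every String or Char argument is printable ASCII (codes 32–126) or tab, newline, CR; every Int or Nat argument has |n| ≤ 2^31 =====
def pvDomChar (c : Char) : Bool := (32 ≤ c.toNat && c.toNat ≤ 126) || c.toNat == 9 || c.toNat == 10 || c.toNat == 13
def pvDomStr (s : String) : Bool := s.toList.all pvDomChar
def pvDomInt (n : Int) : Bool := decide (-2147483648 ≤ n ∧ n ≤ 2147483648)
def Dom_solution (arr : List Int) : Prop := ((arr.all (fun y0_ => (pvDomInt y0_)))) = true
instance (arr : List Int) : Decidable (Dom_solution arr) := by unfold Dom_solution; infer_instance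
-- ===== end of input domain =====

-- B replaces A's stack-popping state machine by a stack-free right-to-left
-- running-minimum scan (A's survivors are exactly the strict suffix minima);
-- same return value, measured faster by a constant factor in a timing run.
-- ===== PORT A =====
-- A's while-loop as recursion over state (stk, i); stack kept top-at-head, reversed on return.
def pvLoopA (arr : List Int) (stk : List Int) (i : Nat) : List Int :=
  if h : i < arr.length then
    match stk with
    | [] => pvLoopA arr [arr[i]] (i + 1)
    | t :: rest =>
      if t < arr[i] then pvLoopA arr (arr[i] :: t :: rest) (i + 1)
      else pvLoopA arr rest i
  else stk
termination_by (arr.length - i) * 2 + stk.length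
decreasing_by all_goals (first | omega | (simp_all; omega) | simp_all)

def solution (arr : List Int) : List Int := (pvLoopA arr [] 0).reverse

-- ===== PORT B =====
-- one step of B's 'for x in reversed(arr)': keep x iff it beats the running minimum m
def pvBStep (p : List Int × Option Int) (x : Int) : List Int × Option Int :=
  match p.2 with
  | none => (p.1 ++ [x], some x)
  | some m => if x < m then (p.1 ++ [x], some x) else p

def solution_alt (arr : List Int) : List Int :=
  (arr.reverse.foldl pvBStep ([], none)).1.reverse

-- ===== PRECONDITION & SPEC =====
def Spec_solution (arr : List Int) (out : List Int) : Prop := out = solution_alt arr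
instance (arr : List Int) (out : List Int) : Decidable (Spec_solution arr out) := by unfold Spec_solution; infer_instance

-- ===== CLAIM (what is proved, stated in full; the proofs are below) =====
def Claim_equal_solution : Prop := ∀ (arr : List Int), Dom_solution arr → Spec_solution arr (solution arr)

-- ===== LEMMAS AND PROOFS =====
-- proof-only helpers: A's pop phase as a function, and A's loop as a single foldl
def pvPopGE (stk : List Int) (x : Int) : List Int :=
  match stk with
  | [] => []
  | t :: rest => if t ≥ x then pvPopGE rest x else t :: rest

def pvStk (xs : List Int) : List Int := xs.foldl (fun stk x => x :: pvPopGE stk x) []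

-- A's pop phase at index i equals pvPopGE followed by the push, advancing i.
theorem pvLoopA_pop (arr : List Int) (i : Nat) (h : i < arr.length) (stk : List Int) :
    pvLoopA arr stk i = pvLoopA arr (arr[i] :: pvPopGE stk arr[i]) (i + 1) := by
  induction stk with
  | nil => rw [pvLoopA]; simp [h, pvPopGE]
  | cons t rest ih =>
    rw [pvLoopA]; simp only [h, dif_pos]
    by_cases hc : t < arr[i]
    · simp [hc, pvPopGE, not_le.mpr hc]
    · simp only [if_neg hc]
      rw [ih]
      have : pvPopGE (t :: rest) arr[i] = pvPopGE rest arr[i] := by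
        simp [pvPopGE, not_lt.mp hc]
      rw [this]

-- A's whole loop from index i equals a foldl over the remaining elements.
theorem pvLoopA_eq_foldl (arr : List Int) (n : Nat) :
    ∀ i stk, arr.length - i ≤ n →
      pvLoopA arr stk i = (arr.drop i).foldl (fun stk x => x :: pvPopGE stk x) stk := by
  induction n with
  | zero =>
    intro i stk hn
    have hi : ¬ i < arr.length := by omega
    rw [pvLoopA, List.drop_eq_nil_of_le (show arr.length ≤ i by omega)]
    simp [hi]
  | succ n ih =>
    intro i stk hn
    by_cases h : i < arr.length
    · rw [pvLoopA_pop arr i h stk]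
      rw [ih (i + 1) _ (by omega)]
      rw [List.drop_eq_getElem_cons h]
      rfl
    · rw [pvLoopA, List.drop_eq_nil_of_le (show arr.length ≤ i by omega)]
      simp [h]

-- popping by y and then by m ≤ y is popping by m
theorem pvPopGE_pvPopGE (L : List Int) (y m : Int) (h : m ≤ y) :
    pvPopGE (pvPopGE L y) m = pvPopGE L m := by
  induction L with
  | nil => rfl
  | cons t rest ih =>
    by_cases ht : t ≥ y
    · simp [pvPopGE, ht, le_trans h ht, ih]
    · simp [pvPopGE, ht]

theorem pvFoldlMin (xs : List Int) : ∀ (a b : Int),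
    xs.foldl min (min a b) = min (xs.foldl min a) b := by
  induction xs with
  | nil => intro a b; rfl
  | cons x t ih =>
    intro a b
    simp only [List.foldl_cons]
    rw [show min (min a b) x = min (min a x) b by
          rw [min_assoc, min_comm b x, ← min_assoc], ih]

-- B's scan from a running minimum m over xs reversed = A's stack for xs, popped by m.
theorem pvBScan (xs : List Int) : ∀ (m : Int) (res : List Int),
    xs.reverse.foldl pvBStep (res, some m)
      = (res ++ pvPopGE (pvStk xs) m, some (xs.foldl min m)) := by
  induction xs using List.reverseRecOn with
  | nil => intro m res; simp [pvStk, pvPopGE]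
  | append_singleton xs y ih =>
    intro m res
    have hstk : pvStk (xs ++ [y]) = y :: pvPopGE (pvStk xs) y := by
      simp [pvStk, List.foldl_append]
    rw [List.reverse_append, List.reverse_singleton, List.singleton_append,
        List.foldl_cons]
    by_cases hy : y < m
    · have hb : pvBStep (res, some m) y = (res ++ [y], some y) := by
        simp [pvBStep, hy]
      rw [hb, ih y (res ++ [y])]
      simp only [Prod.mk.injEq, Option.some.injEq]
      refine ⟨?_, ?_⟩
      · rw [hstk]
        have : pvPopGE (y :: pvPopGE (pvStk xs) y) m
            = y :: pvPopGE (pvStk xs) y := by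
          simp [pvPopGE, not_le.mpr hy]
        rw [this, List.append_assoc]; rfl
      · simp only [List.foldl_append, List.foldl_cons, List.foldl_nil]
        rw [show (y : Int) = min m y by simp [le_of_lt hy],
            ← pvFoldlMin]
        simp [min_eq_right (le_of_lt hy)]
    · have hb : pvBStep (res, some m) y = (res, some m) := by
        simp [pvBStep, hy]
      rw [hb, ih m res]
      simp only [Prod.mk.injEq, Option.some.injEq]
      refine ⟨?_, ?_⟩
      · rw [hstk]
        have : pvPopGE (y :: pvPopGE (pvStk xs) y) m
            = pvPopGE (pvPopGE (pvStk xs) y) m := by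
          simp [pvPopGE, le_of_not_gt hy]
        rw [this, pvPopGE_pvPopGE _ _ _ (le_of_not_gt hy)]
      · simp only [List.foldl_append, List.foldl_cons, List.foldl_nil]
        rw [show min (xs.foldl min m) y = xs.foldl min (min m y) by
              rw [pvFoldlMin],
            min_eq_left (le_of_not_gt hy)]

theorem pvStk_eq_scan (arr : List Int) :
    (arr.reverse.foldl pvBStep ([], none)).1 = pvStk arr := by
  induction arr using List.reverseRecOn with
  | nil => simp [pvStk]
  | append_singleton xs y _ =>
    rw [List.reverse_append, List.reverse_singleton, List.singleton_append,
        List.foldl_cons]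
    have hb : pvBStep (([] : List Int), none) y = ([y], some y) := by
      simp [pvBStep]
    rw [hb, pvBScan xs y [y]]
    simp [pvStk, List.foldl_append]

-- ===== VERDICT (by name: the statement is the Claim_ definition above) =====
theorem solution_spec : Claim_equal_solution := by
  intro arr _
  unfold Spec_solution solution solution_alt
  rw [pvLoopA_eq_foldl arr arr.length 0 [] (by omega), pvStk_eq_scan]
  rfl
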